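-- pv_equiv track=rewrite | github.com/TheSeeven/lexbox | resources/DATA/parsare_legi.py | getParagraphNumber
-- ===== SOURCE A (Python) =====
-- def getParagraphNumber(string):
--     result = ""
--     brackets = 0
--     for i in string:
--         if i == "(":
--             brackets += 1
--         elif i == ")":
--             brackets -= 1
--         elif i != "(" and i != ")":
--             result += i
--         if brackets == 0:
--             return result
-- ===== SOURCE B (Python) =====
-- from itertools import accumulate
--
-- def getParagraphNumber(string):
--     deltas = [1 if c == "(" else -1 if c == ")" else 0 for c in string]
--     balances = list(accumulate(deltas))
--     for j, b in enumerate(balances):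
--         if b == 0:
--             return "".join(c for c in string[:j + 1] if c not in "()")
--     return None
-- ===== Notes on version B (the rewrite author's own statement) =====
-- stated objective: alternative
-- what changed: Replaces the interleaved char loop (mutating a balance counter and a result string with early return) by two separated passes: a precomputed cumulative bracket-balance table (itertools.accumulate) locates the first zero-balance index, then the result is built by filtering the non-parenthesis characters of that prefix.
import Mathlib
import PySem

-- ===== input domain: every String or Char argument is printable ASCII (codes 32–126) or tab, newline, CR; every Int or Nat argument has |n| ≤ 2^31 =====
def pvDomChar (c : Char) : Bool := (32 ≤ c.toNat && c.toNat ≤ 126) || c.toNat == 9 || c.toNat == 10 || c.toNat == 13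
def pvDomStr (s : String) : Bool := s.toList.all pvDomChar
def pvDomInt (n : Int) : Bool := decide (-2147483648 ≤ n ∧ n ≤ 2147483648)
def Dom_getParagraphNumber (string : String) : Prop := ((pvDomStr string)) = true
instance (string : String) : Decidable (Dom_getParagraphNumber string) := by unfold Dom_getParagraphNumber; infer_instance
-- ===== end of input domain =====

-- B separates locating the first zero of a precomputed cumulative bracket-balance table from
-- collecting the non-parenthesis characters of that prefix (alternative decomposition, same cost).

-- ===== PORT A =====
-- the single interleaved loop: update brackets / append to result, early return at balance 0
def pvLoopA : List Char → List Char → Int → Option String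
  | [], _, _ => none
  | c :: cs, result, brackets =>
    let st :=
      if c = '(' then (brackets + 1, result)
      else if c = ')' then (brackets - 1, result)
      else if c ≠ '(' ∧ c ≠ ')' then (brackets, result ++ [c])
      else (brackets, result)
    if st.1 = 0 then some (String.ofList st.2) else pvLoopA cs st.2 st.1

def getParagraphNumber (string : String) : Option String :=
  pvLoopA string.toList [] 0

-- ===== PORT B =====
-- per-character bracket delta
def pvDelta (c : Char) : Int := if c = '(' then 1 else if c = ')' then -1 else 0

-- itertools.accumulate: running sums
def pvAccum : Int → List Int → List Int
  | _, [] => []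
  | acc, d :: ds => (acc + d) :: pvAccum (acc + d) ds

def getParagraphNumber_alt (string : String) : Option String :=
  let cs := string.toList
  let balances := pvAccum 0 (cs.map pvDelta)
  match balances.findIdx? (· == 0) with
  | none => none
  | some j => some (String.ofList ((cs.take (j + 1)).filter (fun c => !(c == '(' || c == ')'))))

-- ===== PRECONDITION & SPEC =====
def Spec_getParagraphNumber (string : String) (out : Option String) : Prop := out = getParagraphNumber_alt string
instance (string : String) (out : Option String) : Decidable (Spec_getParagraphNumber string out) := by unfold Spec_getParagraphNumber; infer_instance

-- ===== CLAIM (what is proved, stated in full; the proofs are below) =====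
def Claim_equal_getParagraphNumber : Prop := ∀ (string : String), Dom_getParagraphNumber string → Spec_getParagraphNumber string (getParagraphNumber string)

-- ===== LEMMAS AND PROOFS =====

theorem pvLoopA_eq (cs : List Char) : ∀ (res : List Char) (b : Int),
    pvLoopA cs res b =
      match (pvAccum b (cs.map pvDelta)).findIdx? (· == 0) with
      | none => none
      | some j => some (String.ofList (res ++ (cs.take (j + 1)).filter (fun c => !(c == '(' || c == ')')))) := by
  induction cs with
  | nil => intro res b; simp [pvLoopA, pvAccum]
  | cons c cs ih =>
    intro res b
    have hd : pvAccum b ((c :: cs).map pvDelta) = (b + pvDelta c) :: pvAccum (b + pvDelta c) (cs.map pvDelta) := by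
      simp [pvAccum]
    rw [hd, List.findIdx?_cons]
    by_cases hz : b + pvDelta c = 0
    · -- first balance is zero: A returns here
      by_cases h1 : c = '('
      · subst h1; simp [pvDelta] at hz
        simp [pvLoopA, pvDelta, hz]
      · by_cases h2 : c = ')'
        · subst h2; simp [pvDelta] at hz
          have hz2 : b - 1 = 0 := by omega
          simp [pvLoopA, pvDelta, h1, hz, hz2]
        · simp [pvDelta, h1, h2] at hz
          simp [pvLoopA, pvDelta, h1, h2, hz]
    · -- recurse
      have hstep : ∀ res', pvLoopA (c :: cs) res' b =
          pvLoopA cs (res' ++ (if (!(c == '(' || c == ')')) then [c] else [])) (b + pvDelta c) := by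
        intro res'
        by_cases h1 : c = '('
        · subst h1; simp [pvDelta] at hz
          simp [pvLoopA, pvDelta, hz]
        · by_cases h2 : c = ')'
          · subst h2; simp [pvDelta] at hz
            have hz2 : ¬ b - 1 = 0 := by omega
            simp [pvLoopA, pvDelta, h1, hz2]
            exact congrArg (pvLoopA cs res') (by omega)
          · simp [pvDelta, h1, h2] at hz
            simp [pvLoopA, pvDelta, h1, h2, hz]
      rw [hstep res, ih]
      have hzb : ((b + pvDelta c == 0) : Bool) = false := by simpa using hz
      simp only [hzb, Bool.false_eq_true, if_false]
      cases hfi : (pvAccum (b + pvDelta c) (cs.map pvDelta)).findIdx? (· == 0) with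
      | none => simp
      | some j =>
        simp only [Option.map_some]
        have ht : (c :: cs).take (j + 1 + 1) = c :: cs.take (j + 1) := by simp
        rw [ht]
        by_cases h1 : c = '('
        · simp [h1]
        · by_cases h2 : c = ')'
          · simp [h1, h2]
          · simp [h1, h2]

-- ===== VERDICT (by name: the statement is the Claim_ definition above) =====
theorem getParagraphNumber_spec : Claim_equal_getParagraphNumber := by
  intro s _
  unfold Spec_getParagraphNumber getParagraphNumber getParagraphNumber_alt
  rw [pvLoopA_eq]
  cases hfi : (pvAccum 0 (s.toList.map pvDelta)).findIdx? (· == 0) <;> simp [hfi]
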